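-- pv_equiv track=rewrite | github.com/akavi/nanoGPT | config/face_fft_config.py | _chebyshev_shell_indices
-- ===== SOURCE A (Python) =====
-- from typing import List, Tuple, Any
--
-- def _chebyshev_shell_indices(h: int, w_rfft: int) -> List[Tuple[int, int]]:
--     """
--     Return (i, j) indices for an h x w_rfft grid ordered by
--     Chebyshev distance from the center (cy = h//2, cx = 0),
--     then by squared Euclidean distance, then by (i, j).
--
--     This gives a deterministic "spiral-ish" ordering outward
--     from DC after fftshift on axis 0 only.
--     """
--     cy, cx = h // 2, 0  # DC index after fftshift along axis 0
--     coords = [(i, j) for i in range(h) for j in range(w_rfft)]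
--
--     def key(ij: Tuple[int, int]):
--         i, j = ij
--         ky = i - cy      # vertical frequency index (can be negative)
--         kx = j           # horizontal frequency index, rfft: kx >= 0
--         r_inf = max(abs(ky), abs(kx))      # Chebyshev radius
--         r2 = ky * ky + kx * kx             # Euclidean radius^2 (tie-breaker)
--         return (r_inf, r2, i, j)
--
--     coords.sort(key=key)
--     return coords
-- ===== SOURCE B (Python) =====
-- from typing import List, Tuple
--
--
-- def _chebyshev_shell_indices(h: int, w_rfft: int) -> List[Tuple[int, int]]:
--     """Bucket every cell by its Chebyshev radius from the center (cy = h//2, cx = 0)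
--     in one pass, then walk the shells outward: sort each shell locally by
--     (squared Euclidean radius, i, j) and append shell by shell."""
--     cy = h // 2
--     buckets = {}
--     for i in range(h):
--         for j in range(w_rfft):
--             r = max(abs(i - cy), j)
--             buckets.setdefault(r, []).append((i, j))
--     out = []
--     for r in sorted(buckets):
--         shell = buckets[r]
--         shell.sort(key=lambda ij: ((ij[0] - cy) ** 2 + ij[1] ** 2, ij[0], ij[1]))
--         out += shell
--     return out
-- ===== Notes on version B (the rewrite author's own statement) =====
-- stated objective: alternative
-- what changed: B replaces A's single global sort under the 4-component key by an outward walk over Chebyshev shells r = 0..max_r, collecting each shell by a filter, sorting it locally by (squared Euclidean radius, i, j) and concatenating the shells in increasing radius order.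
import Mathlib
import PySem

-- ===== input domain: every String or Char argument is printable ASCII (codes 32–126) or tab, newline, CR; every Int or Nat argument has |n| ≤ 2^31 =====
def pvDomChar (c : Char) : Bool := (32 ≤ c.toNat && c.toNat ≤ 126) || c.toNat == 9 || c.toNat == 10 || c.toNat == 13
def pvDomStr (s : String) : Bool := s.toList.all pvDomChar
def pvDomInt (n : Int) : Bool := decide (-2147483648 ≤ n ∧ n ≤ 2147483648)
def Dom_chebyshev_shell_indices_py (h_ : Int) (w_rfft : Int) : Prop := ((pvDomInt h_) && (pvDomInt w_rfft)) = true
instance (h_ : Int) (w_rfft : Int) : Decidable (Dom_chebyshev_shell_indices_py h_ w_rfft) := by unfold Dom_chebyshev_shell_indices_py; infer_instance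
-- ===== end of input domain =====

-- B buckets the cells by Chebyshev radius in one pass and walks the shells outward,
-- sorting each shell locally by (r², i, j), instead of A's single global
-- 4-component-key sort (objective: alternative).

-- ===== PORT A =====
-- coords = [(i, j) for i in range(h) for j in range(w_rfft)]
def pvCoords (h_ : Int) (w_rfft : Int) : List (Int × Int) :=
  (PySem.List.pyRange 0 h_ 1).flatMap (fun i => (PySem.List.pyRange 0 w_rfft 1).map (fun j => (i, j)))

-- key(a) < key(b) for A's key(ij) = (r_inf, r2, i, j), Python's lexicographic tuple
-- comparison written out component by component (exact: Python compares tuples of ints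
-- exactly this way)
def pvKeyALt (cy : Int) (a b : Int × Int) : Bool :=
  decide (max |a.1 - cy| |a.2| < max |b.1 - cy| |b.2| ∨
    (max |a.1 - cy| |a.2| = max |b.1 - cy| |b.2| ∧
      ((a.1 - cy) * (a.1 - cy) + a.2 * a.2 < (b.1 - cy) * (b.1 - cy) + b.2 * b.2 ∨
        ((a.1 - cy) * (a.1 - cy) + a.2 * a.2 = (b.1 - cy) * (b.1 - cy) + b.2 * b.2 ∧
          (a.1 < b.1 ∨ (a.1 = b.1 ∧ a.2 < b.2))))))

-- coords.sort(key=key): PySem's stable sort, spelled as its foldl/insertBy implementation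
-- (rfl-equal to PySem.List.sorted, see PySem.List.sorted_eq_foldl_insertBy) because the
-- 4-component tuple key is given as the explicit comparison pvKeyALt
def chebyshev_shell_indices_py (h_ : Int) (w_rfft : Int) : List (Int × Int) :=
  let cy := PySem.Int.floordiv h_ 2
  (pvCoords h_ w_rfft).foldl (fun acc x => PySem.List.insertBy (pvKeyALt cy) x acc) []

-- ===== PORT B =====
-- B's local key: ((ij[0]-cy)**2 + ij[1]**2, ij[0], ij[1]); Python tuple order = nested Lex
def pvKey2 (cy : Int) (ij : Int × Int) : Lex (Int × Lex (Int × Int)) :=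
  toLex ((ij.1 - cy) * (ij.1 - cy) + ij.2 * ij.2, toLex (ij.1, ij.2))

-- buckets.setdefault(r, []).append((i, j)) is Dict.modify r [] (· ++ [(i, j)]);
-- sorted(buckets) is the sorted list of keys; buckets[r] with r a present key is getD r []
def chebyshev_shell_indices_py_alt (h_ : Int) (w_rfft : Int) : List (Int × Int) :=
  let cy := PySem.Int.floordiv h_ 2
  let buckets :=
    (PySem.List.pyRange 0 h_ 1).foldl (fun d i =>
      (PySem.List.pyRange 0 w_rfft 1).foldl (fun d j =>
        d.modify (max |i - cy| j) [] (· ++ [(i, j)])) d) PySem.Dict.empty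
  (PySem.List.sorted buckets.keys (fun x => x) false).foldl
    (fun out r => out ++ PySem.List.sorted (buckets.getD r []) (pvKey2 cy) false) []

-- ===== PRECONDITION & SPEC =====
def Spec_chebyshev_shell_indices_py (h_ : Int) (w_rfft : Int) (out : List (Int × Int)) : Prop := out = chebyshev_shell_indices_py_alt h_ w_rfft
instance (h_ : Int) (w_rfft : Int) (out : List (Int × Int)) : Decidable (Spec_chebyshev_shell_indices_py h_ w_rfft out) := by unfold Spec_chebyshev_shell_indices_py; infer_instance

-- ===== CLAIM (what is proved, stated in full; the proofs are below) =====
def Claim_equal_chebyshev_shell_indices_py : Prop := ∀ (h_ : Int) (w_rfft : Int), Dom_chebyshev_shell_indices_py h_ w_rfft → Spec_chebyshev_shell_indices_py h_ w_rfft (chebyshev_shell_indices_py h_ w_rfft)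

-- ===== LEMMAS AND PROOFS =====

-- A's tuple key at proof level (nested Lex = Python tuple order)
def pvKeyA (cy : Int) (ij : Int × Int) : Lex (Int × Lex (Int × Lex (Int × Int))) :=
  toLex (max |ij.1 - cy| |ij.2|, toLex ((ij.1 - cy) * (ij.1 - cy) + ij.2 * ij.2, toLex (ij.1, ij.2)))

-- B's shell radius of a cell
def pvG (cy : Int) (ij : Int × Int) : Int := max |ij.1 - cy| ij.2

theorem portA_eq_sorted (h_ w_rfft : Int) :
    chebyshev_shell_indices_py h_ w_rfft =
      PySem.List.sorted (pvCoords h_ w_rfft) (pvKeyA (PySem.Int.floordiv h_ 2)) false := by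
  rw [PySem.List.sorted_eq_foldl_insertBy]
  unfold chebyshev_shell_indices_py
  have : (fun a b => pvKeyALt (PySem.Int.floordiv h_ 2) a b)
      = (fun a b => decide (pvKeyA (PySem.Int.floordiv h_ 2) a < pvKeyA (PySem.Int.floordiv h_ 2) b)) := by
    funext a b
    rw [pvKeyALt, decide_eq_decide, pvKeyA, pvKeyA,
      Prod.Lex.lt_iff, Prod.Lex.lt_iff, Prod.Lex.lt_iff]
    simp
  simp only [this]

theorem mem_pvCoords (h_ w_rfft : Int) (ij : Int × Int) :
    ij ∈ pvCoords h_ w_rfft ↔ 0 ≤ ij.1 ∧ ij.1 < h_ ∧ 0 ≤ ij.2 ∧ ij.2 < w_rfft := by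
  obtain ⟨i, j⟩ := ij
  simp only [pvCoords, List.mem_flatMap, List.mem_map, PySem.List.mem_pyRange_one,
    Prod.mk.injEq]
  constructor
  · rintro ⟨a, ⟨ha1, ha2⟩, b, ⟨hb1, hb2⟩, h1, h2⟩
    subst h1; subst h2; exact ⟨ha1, ha2, hb1, hb2⟩
  · rintro ⟨h1, h2, h3, h4⟩
    exact ⟨i, ⟨h1, h2⟩, j, ⟨h3, h4⟩, rfl, rfl⟩

theorem nodup_pvCoords (h_ w_rfft : Int) : (pvCoords h_ w_rfft).Nodup := by
  have : pvCoords h_ w_rfft = (PySem.List.pyRange 0 h_ 1) ×ˢ (PySem.List.pyRange 0 w_rfft 1) := rfl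
  rw [this]
  exact (PySem.List.nodup_pyRange_one 0 h_).product (PySem.List.nodup_pyRange_one 0 w_rfft)

theorem pvKey2_inj (cy : Int) (a b : Int × Int) (h : pvKey2 cy a = pvKey2 cy b) : a = b := by
  unfold pvKey2 at h
  have h1 := toLex.injective h
  have h2 := toLex.injective (congrArg Prod.snd h1)
  exact Prod.ext (congrArg Prod.fst h2) (congrArg Prod.snd h2)

-- A's key is B's shell radius paired with B's local key, for cells with j ≥ 0
theorem pvKeyA_eq (cy : Int) (ij : Int × Int) (hj : 0 ≤ ij.2) :
    pvKeyA cy ij = toLex (pvG cy ij, pvKey2 cy ij) := by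
  unfold pvKeyA pvG pvKey2
  rw [abs_of_nonneg hj]

-- generic: folding over a flatMap is the nested fold
theorem foldl_flatMap_eq {α β δ : Type} (g : α → List β) (f : δ → β → δ) :
    ∀ (l : List α) (d : δ),
      (l.flatMap g).foldl f d = l.foldl (fun d a => (g a).foldl f d) d := by
  intro l
  induction l with
  | nil => intro d; rfl
  | cons a l ih => intro d; rw [List.flatMap_cons, List.foldl_append, List.foldl_cons, ih]

-- B's nested bucket-building loops are one fold over coords
theorem buckets_eq (h_ w_rfft cy : Int) :
    ((PySem.List.pyRange 0 h_ 1).foldl (fun d i =>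
        (PySem.List.pyRange 0 w_rfft 1).foldl (fun d j =>
          d.modify (max |i - cy| j) [] (· ++ [(i, j)])) d) PySem.Dict.empty)
      = (pvCoords h_ w_rfft).foldl
          (fun d ij => d.modify (pvG cy ij) [] (· ++ [ij])) PySem.Dict.empty := by
  rw [pvCoords, foldl_flatMap_eq]
  simp only [List.foldl_map]
  rfl

theorem buckets_getD (cy : Int) (xs : List (Int × Int)) (r : Int) :
    (xs.foldl (fun d ij => d.modify (pvG cy ij) [] (· ++ [ij])) PySem.Dict.empty).getD r []
      = xs.filter (fun ij => pvG cy ij == r) := by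
  have h1 : (xs.foldl (fun d ij => d.modify (pvG cy ij) [] (· ++ [ij])) PySem.Dict.empty)
      = ((xs.map (fun ij => (pvG cy ij, ij))).foldl
          (fun d p => d.modify p.1 [] (· ++ [p.2])) PySem.Dict.empty) := by
    rw [List.foldl_map]
  rw [h1, PySem.Dict.getD_foldl_modify_append, PySem.Dict.getD_empty, List.nil_append,
    List.filter_map]
  have h2 : ((fun p => p.1 == r) ∘ (fun ij => (pvG cy ij, ij)))
      = fun ij => pvG cy ij == r := rfl
  rw [h2, List.map_map]
  have h3 : ((fun x : Int × (Int × Int) => x.2) ∘ (fun ij => (pvG cy ij, ij)))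
      = fun ij : Int × Int => ij := rfl
  rw [h3, List.map_id_fun']
  rfl

theorem buckets_keys_mem (cy : Int) (xs : List (Int × Int)) (r : Int) :
    r ∈ (xs.foldl (fun d ij => d.modify (pvG cy ij) [] (· ++ [ij])) PySem.Dict.empty).keys
      ↔ r ∈ xs.map (pvG cy) := by
  rw [PySem.Dict.keys_foldl_modify_key xs (pvG cy) [] (fun _ ij => (· ++ [ij])),
    PySem.Set.mem_update, PySem.Dict.keys_empty]
  simp

theorem buckets_keys_nodup (cy : Int) (xs : List (Int × Int)) :
    (xs.foldl (fun d ij => d.modify (pvG cy ij) [] (· ++ [ij])) PySem.Dict.empty).keys.Nodup :=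
  PySem.Dict.nodup_keys_foldl_modify_key xs (pvG cy) [] (fun _ ij => (· ++ [ij]))
    PySem.Dict.empty (by rw [PySem.Dict.keys_empty]; exact List.nodup_nil)

theorem filter_disjoint_perm (p q : (Int × Int) → Bool) (xs : List (Int × Int))
    (hdisj : ∀ x, p x = true → q x = false) :
    (xs.filter p ++ xs.filter q).Perm (xs.filter (fun x => p x || q x)) := by
  induction xs with
  | nil => simp
  | cons x xs ih =>
    by_cases hp : p x = true
    · have hq := hdisj x hp
      simp only [List.filter_cons, hp, hq, if_true, Bool.true_or, List.cons_append]
      exact ih.cons x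
    · rw [Bool.not_eq_true] at hp
      by_cases hq : q x = true
      · simp only [List.filter_cons, hp, hq, if_true, Bool.false_or]
        exact List.perm_middle.trans (ih.cons x)
      · rw [Bool.not_eq_true] at hq
        simp only [List.filter_cons, hp, hq, Bool.false_or]
        exact ih

theorem flat_filter_perm (cy : Int) (xs : List (Int × Int)) (rs : List Int) (hnd : rs.Nodup)
    (hcov : ∀ x ∈ xs, pvG cy x ∈ rs) :
    ((rs.flatMap
        (fun r => PySem.List.sorted (xs.filter (fun x => pvG cy x == r)) (pvKey2 cy) false))).Perm
      xs := by
  have main : ∀ rs : List Int, rs.Nodup →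
      ((rs.flatMap
          (fun r => PySem.List.sorted (xs.filter (fun x => pvG cy x == r)) (pvKey2 cy) false))).Perm
        (xs.filter (fun x => decide (pvG cy x ∈ rs))) := by
    intro rs hnd
    induction rs with
    | nil => simp
    | cons r rs ih =>
      rw [List.flatMap_cons]
      have hr : r ∉ rs := (List.nodup_cons.mp hnd).1
      have step := (PySem.List.sorted_perm (xs.filter (fun x => pvG cy x == r)) (pvKey2 cy)
        false).append (ih (List.nodup_cons.mp hnd).2)
      refine step.trans ?_
      have hpred : (fun x => (pvG cy x == r) || decide (pvG cy x ∈ rs))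
          = fun x => decide (pvG cy x ∈ r :: rs) := by
        funext x
        by_cases h : pvG cy x = r <;> simp [h, List.mem_cons]
      refine (filter_disjoint_perm _ _ xs ?_).trans (by rw [hpred])
      intro x hx
      have : pvG cy x = r := by simpa using hx
      simp [this, hr]
  refine (main rs hnd).trans ?_
  have : xs.filter (fun x => decide (pvG cy x ∈ rs)) = xs := by
    rw [List.filter_eq_self]
    intro x hx
    simpa using hcov x hx
  rw [this]

theorem bucket_pairwise (cy : Int) (xs : List (Int × Int)) (hnd : xs.Nodup) (r : Int) :
    List.Pairwise (fun a b => pvKey2 cy a < pvKey2 cy b)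
      (PySem.List.sorted (xs.filter (fun x => pvG cy x == r)) (pvKey2 cy) false) := by
  have hle := PySem.List.sorted_pairwise (xs.filter (fun x => pvG cy x == r)) (pvKey2 cy)
  have hnd2 : (PySem.List.sorted (xs.filter (fun x => pvG cy x == r)) (pvKey2 cy) false).Nodup :=
    List.Perm.nodup
      (PySem.List.sorted_perm (xs.filter (fun x => pvG cy x == r)) (pvKey2 cy) false).symm
      (hnd.filter _)
  refine List.Pairwise.imp ?_ (hle.and hnd2)
  rintro a b ⟨hab, hne⟩
  rcases lt_or_eq_of_le hab with h | h
  · exact h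
  · exact absurd (pvKey2_inj cy a b h) hne

theorem flat_pairwise (cy : Int) (xs : List (Int × Int)) (hnd : xs.Nodup)
    (hx : ∀ x ∈ xs, 0 ≤ x.2) :
    ∀ rs : List Int, rs.Pairwise (· < ·) →
      List.Pairwise (fun a b => pvKeyA cy a < pvKeyA cy b)
        (rs.flatMap
          (fun r => PySem.List.sorted (xs.filter (fun x => pvG cy x == r)) (pvKey2 cy) false)) := by
  intro rs
  induction rs with
  | nil => simp
  | cons r rs ih =>
    intro hp
    rw [List.flatMap_cons, List.pairwise_append]
    refine ⟨?_, ih hp.of_cons, ?_⟩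
    · -- within the shell: equal pvG, strictly increasing pvKey2 ⇒ strict pvKeyA
      refine (bucket_pairwise cy xs hnd r).imp_of_mem ?_
      intro a b ha hb hlt
      rw [PySem.List.mem_sorted, List.mem_filter] at ha hb
      rw [pvKeyA_eq cy a (hx a ha.1), pvKeyA_eq cy b (hx b hb.1), Prod.Lex.lt_iff]
      right
      constructor
      · have hga : pvG cy a = r := by simpa using ha.2
        have hgb : pvG cy b = r := by simpa using hb.2
        simp only [ofLex_toLex]
        omega
      · exact hlt
    · -- across shells: later shells have strictly larger pvG
      intro a ha b hb
      rw [PySem.List.mem_sorted, List.mem_filter] at ha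
      rw [List.mem_flatMap] at hb
      obtain ⟨r', hr', hb⟩ := hb
      rw [PySem.List.mem_sorted, List.mem_filter] at hb
      have hga : pvG cy a = r := by simpa using ha.2
      have hgb : pvG cy b = r' := by simpa using hb.2
      have hrr : r < r' := List.rel_of_pairwise_cons hp hr'
      rw [pvKeyA_eq cy a (hx a ha.1), pvKeyA_eq cy b (hx b hb.1), Prod.Lex.lt_iff]
      left
      simp only [ofLex_toLex]
      omega

-- ===== VERDICT (by name: the statement is the Claim_ definition above) =====
theorem chebyshev_shell_indices_py_spec : Claim_equal_chebyshev_shell_indices_py := by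
  intro h_ w_rfft _
  unfold Spec_chebyshev_shell_indices_py
  rw [portA_eq_sorted]
  unfold chebyshev_shell_indices_py_alt
  simp only [buckets_eq h_ w_rfft (PySem.Int.floordiv h_ 2)]
  set cy := PySem.Int.floordiv h_ 2 with hcy
  set coords := pvCoords h_ w_rfft with hco
  set buckets := coords.foldl (fun d ij => d.modify (pvG cy ij) [] (· ++ [ij]))
    PySem.Dict.empty with hbk
  set rs := PySem.List.sorted buckets.keys (fun x => x) false with hrs
  have hrs_nodup : rs.Nodup :=
    (PySem.List.sorted_perm buckets.keys (fun x => x) false).symm.nodup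
      (buckets_keys_nodup cy coords)
  have hrs_lt : rs.Pairwise (· < ·) := by
    have hle := PySem.List.sorted_pairwise buckets.keys (fun x => x)
    refine List.Pairwise.imp ?_ (hle.and hrs_nodup)
    rintro a b ⟨hab, hne⟩
    exact lt_of_le_of_ne hab hne
  have hcov : ∀ x ∈ coords, pvG cy x ∈ rs := by
    intro x hx
    rw [hrs, PySem.List.mem_sorted, buckets_keys_mem]
    exact List.mem_map_of_mem hx
  rw [PySem.List.foldl_append_eq_flatMap, List.nil_append]
  simp only [hbk, buckets_getD cy coords]
  refine PySem.List.sorted_eq_of_perm_of_pairwise_lt _ _ _ ?_ ?_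
  · exact flat_filter_perm cy coords rs hrs_nodup hcov
  · exact flat_pairwise cy coords (nodup_pvCoords h_ w_rfft)
      (fun y hy => ((mem_pvCoords h_ w_rfft y).mp hy).2.2.1) rs hrs_lt
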